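-- pv_equiv track=rewrite | github.com/florence-r-lin/CS-05 | hw1pr3.py | ind
-- ===== SOURCE A (Python) =====
-- def ind(e, L):
--     """returns index where e is first found in L. if e is NOT in L, ind(e, L) will return an integer that denotes the length of L.
--        Arguemnts: L can be a string or list and e is an element
--     """
--     if e not in L:
--         return len(L)
--     if len(L) == 0:
--         return 0
--     if e == L[0]:
--         return 0
--     if e in L:
--         return 1 + ind(e, L[1:])
-- ===== SOURCE B (Python) =====
-- def ind(e, L):
--     """Iterative linear scan: first index of e in L, else len(L)."""
--     for i, x in enumerate(L):
--         if x == e: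
--             return i
--     return len(L)
-- ===== Notes on version B (the rewrite author's own statement) =====
-- stated objective: simpler
-- what changed: Replaces A's recursion on the tail with repeated membership tests and list slicing by a single iterative enumerate scan that returns the first matching index.
import Mathlib
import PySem

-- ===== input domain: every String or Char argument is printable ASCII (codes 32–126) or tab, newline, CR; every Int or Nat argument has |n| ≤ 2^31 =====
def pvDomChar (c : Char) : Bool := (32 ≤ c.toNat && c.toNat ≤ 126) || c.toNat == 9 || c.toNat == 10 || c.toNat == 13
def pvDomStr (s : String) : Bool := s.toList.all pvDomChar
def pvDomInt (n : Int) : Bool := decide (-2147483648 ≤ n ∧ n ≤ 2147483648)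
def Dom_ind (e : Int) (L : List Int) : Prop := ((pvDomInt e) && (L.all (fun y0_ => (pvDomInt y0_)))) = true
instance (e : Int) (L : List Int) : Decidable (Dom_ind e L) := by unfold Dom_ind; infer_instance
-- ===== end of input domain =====

-- B replaces A's recursive slice-and-membership-test scheme by one iterative indexed scan (simpler).


-- ===== PORT A =====
-- Transliteration of A: `e not in L` → ¬contains; `L[0]`/`L[1:]` for the (nonempty) list
-- are the head/tail of the cons cell; the final `if e in L:` guard is kept. If no branch
-- fires Python would return None — that point is unreachable (the guard holds whenever
-- reached), the 0 in that dead branch is never the result.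
def ind (e : Int) (L : List Int) : Int :=
  if L.contains e = false then (L.length : Int)
  else if L.length = 0 then 0
  else match L with
    | [] => 0                -- unreachable: length ≠ 0
    | a :: rest =>
      if e = a then 0
      else if (a :: rest).contains e then 1 + ind e rest
      else 0                 -- unreachable (Python would return None)

-- ===== PORT B =====
-- Transliteration of B: `for i, x in enumerate(L): if x == e: return i` as an index-carrying
-- loop returning `some i` on early return, then `return len(L)` when the loop completes.
def indAltGo (e : Int) (l : List Int) (i : Int) : Option Int :=
  match l with
  | [] => none
  | x :: rest => if x = e then some i else indAltGo e rest (i + 1)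

def ind_alt (e : Int) (L : List Int) : Int :=
  match indAltGo e L 0 with
  | some i => i
  | none => (L.length : Int)

-- ===== PRECONDITION & SPEC =====
def Spec_ind (e : Int) (L : List Int) (out : Int) : Prop := out = ind_alt e L
instance (e : Int) (L : List Int) (out : Int) : Decidable (Spec_ind e L out) := by unfold Spec_ind; infer_instance

-- ===== CLAIM (what is proved, stated in full; the proofs are below) =====
def Claim_equal_ind : Prop := ∀ (e : Int) (L : List Int), Dom_ind e L → Spec_ind e L (ind e L)

-- ===== LEMMAS AND PROOFS =====

theorem indAltGo_shift (e : Int) (l : List Int) (i : Int) :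
    indAltGo e l i = (indAltGo e l 0).map (i + ·) := by
  induction l generalizing i with
  | nil => simp [indAltGo]
  | cons x rest ih =>
    simp only [indAltGo]
    by_cases h : x = e
    · simp [h]
    · simp only [h, if_false]
      rw [ih (i + 1), ih (0 + 1), Option.map_map]
      congr 1
      funext j
      simp
      omega

theorem indAltGo_none (e : Int) (l : List Int) (i : Int) (h : l.contains e = false) :
    indAltGo e l i = none := by
  induction l generalizing i with
  | nil => rfl
  | cons x rest ih =>
    simp only [List.contains_cons, Bool.or_eq_false_iff] at h
    have hx : x ≠ e := by
      intro hxe; exact absurd (beq_iff_eq.mpr hxe.symm) (by simp [h.1])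
    simp only [indAltGo, hx, if_false]
    exact ih _ (h.2)

theorem ind_alt_cons (e a : Int) (rest : List Int) :
    ind_alt e (a :: rest) = if a = e then 0 else 1 + ind_alt e rest := by
  by_cases h : a = e
  · simp [ind_alt, indAltGo, h]
  · simp only [ind_alt, indAltGo, h, if_false]
    rw [indAltGo_shift e rest (0 + 1)]
    cases hr : indAltGo e rest 0 with
    | none => simp [List.length_cons]; omega
    | some j => simp

theorem ind_eq_alt (e : Int) (L : List Int) : ind e L = ind_alt e L := by
  induction L with
  | nil => simp [ind, ind_alt, indAltGo]
  | cons a rest ih =>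
    rw [ind_alt_cons]
    by_cases hc : (a :: rest).contains e = false
    · -- e not in the list: both sides are the length
      have ha : ¬ a = e := by
        intro hae
        simp [hae] at hc
      have hr : rest.contains e = false := by
        simp only [List.contains_cons, Bool.or_eq_false_iff] at hc
        exact hc.2
      simp only [ind, hc, if_true]
      simp [ind_alt, indAltGo_none e rest 0 hr, List.length_cons, ha]
      omega
    · -- e is in the list
      simp only [Bool.not_eq_false] at hc
      by_cases ha : e = a
      · simp [ind, ha]
      · have ha' : ¬ a = e := fun h => ha h.symm
        simp only [ind, hc, Bool.true_eq_false, if_false, List.length_cons,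
          Nat.succ_ne_zero, ha, ha', if_false]
        simp [ih]

-- ===== VERDICT (by name: the statement is the Claim_ definition above) =====
theorem ind_spec : Claim_equal_ind := by
  intro e L _
  unfold Spec_ind
  exact ind_eq_alt e L
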